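-- pv_equiv track=rewrite | github.com/mattm2562/projectEuler | P5smallestMultiple.py | div1throughNum
-- ===== SOURCE A (Python) =====
-- def div1throughNum(num, top):
--     sum = 0
--
--     for i in range(1,top+1):
--         if num % i == 0:
--             sum = sum + 1
--
--     if (sum == top):
--         return True
--     else:
--         return False
-- ===== SOURCE B (Python) =====
-- def div1throughNum(num, top):
--     # Build the running LCM of 1..top; num is divisible by all of 1..top
--     # iff it is divisible by that LCM.  Once the running LCM exceeds
--     # abs(num) (num != 0) it can no longer divide num, so stop early.
--     acc = 1
--     for i in range(1, top + 1):
--         a, b = acc, i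
--         while b:
--             a, b = b, a % b
--         acc = acc * i // a
--         if num != 0 and acc > abs(num):
--             return False
--     return top >= 0 and num % acc == 0
-- ===== Notes on version B (the rewrite author's own statement) =====
-- stated objective: faster
-- what changed: Instead of counting how many i in 1..top divide num and comparing the count to top, B accumulates the LCM of 1..top (Euclid gcd per step) with an early False return once the LCM exceeds abs(num), then does a single divisibility test guarded by top >= 0.
import Mathlib
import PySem

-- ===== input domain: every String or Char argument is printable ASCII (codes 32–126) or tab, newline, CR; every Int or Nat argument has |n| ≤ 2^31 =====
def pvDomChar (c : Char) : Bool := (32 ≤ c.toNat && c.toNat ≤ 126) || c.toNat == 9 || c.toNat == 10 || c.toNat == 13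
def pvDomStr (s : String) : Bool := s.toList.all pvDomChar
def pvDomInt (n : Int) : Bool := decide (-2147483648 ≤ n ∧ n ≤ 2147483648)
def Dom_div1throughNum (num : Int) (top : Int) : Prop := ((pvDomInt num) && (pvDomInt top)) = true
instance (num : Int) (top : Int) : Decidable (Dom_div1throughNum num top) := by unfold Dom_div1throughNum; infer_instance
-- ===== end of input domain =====

-- B replaces A's per-i divisor count with the running LCM of 1..top (Euclid gcd per step,
-- early False once the LCM exceeds |num| for num ≠ 0) and one final divisibility test.

-- ===== PORT A =====
def div1throughNum (num : Int) (top : Int) : Bool :=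
  -- sum = 0; for i in range(1, top+1): if num % i == 0: sum += 1; return sum == top
  if (PySem.List.pyRange 1 (top + 1) 1).foldl
      (fun s i => if PySem.Int.mod num i == 0 then s + 1 else s) (0 : Int) = top
  then true else false

-- ===== PORT B =====
-- the inner `while b: a, b = b, a % b` of Source B
def pygcd (a b : Int) : Int :=
  if b = 0 then a else pygcd b (PySem.Int.mod a b)
termination_by b.natAbs
decreasing_by
  rename_i h
  rcases lt_trichotomy b 0 with hb | hb | hb
  · have := PySem.Int.mod_neg_bounds (a := a) hb; omega
  · exact absurd hb h
  · have h1 := PySem.Int.mod_nonneg (a := a) hb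
    have h2 := PySem.Int.mod_lt (a := a) hb
    omega

-- the `for i in range(1, top+1)` loop of Source B; `none` is its early `return False`
def bLoop (num : Int) : List Int → Int → Option Int
  | [], acc => some acc
  | i :: L, acc =>
      if num ≠ 0 ∧ |num| < PySem.Int.floordiv (acc * i) (pygcd acc i) then none
      else bLoop num L (PySem.Int.floordiv (acc * i) (pygcd acc i))

def div1throughNum_alt (num : Int) (top : Int) : Bool :=
  match bLoop num (PySem.List.pyRange 1 (top + 1) 1) 1 with
  | none => false
  | some acc => decide (0 ≤ top) && (PySem.Int.mod num acc == 0)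

-- ===== PRECONDITION & SPEC =====
def Spec_div1throughNum (num : Int) (top : Int) (out : Bool) : Prop := out = div1throughNum_alt num top
instance (num : Int) (top : Int) (out : Bool) : Decidable (Spec_div1throughNum num top out) := by unfold Spec_div1throughNum; infer_instance

-- ===== CLAIM (what is proved, stated in full; the proofs are below) =====
def Claim_equal_div1throughNum : Prop := ∀ (num : Int) (top : Int), Dom_div1throughNum num top → Spec_div1throughNum num top (div1throughNum num top)

-- ===== LEMMAS AND PROOFS =====

theorem int_lcm_dvd (a b m : Int) (h1 : a ∣ m) (h2 : b ∣ m) : (Int.lcm a b : Int) ∣ m := by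
  rw [Int.coe_lcm]; exact lcm_dvd h1 h2

theorem int_dvd_lcm_left (a b : Int) : a ∣ (Int.lcm a b : Int) := by
  rw [Int.coe_lcm]; exact dvd_lcm_left a b

theorem int_dvd_lcm_right (a b : Int) : b ∣ (Int.lcm a b : Int) := by
  rw [Int.coe_lcm]; exact dvd_lcm_right a b

theorem pygcd_eq_aux : ∀ (n : Nat) (a b : Int), b.natAbs ≤ n → 0 ≤ a → 0 ≤ b →
    pygcd a b = (Int.gcd a b : Int) := by
  intro n
  induction n with
  | zero =>
    intro a b hbn ha _
    have hb0 : b = 0 := by omega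
    subst hb0
    rw [pygcd]
    simp [Int.natAbs_of_nonneg ha]
  | succ n ih =>
    intro a b hbn ha hb
    rw [pygcd]
    by_cases h : b = 0
    · subst h; simp [Int.natAbs_of_nonneg ha]
    · rw [if_neg h]
      have hbpos : 0 < b := lt_of_le_of_ne hb (Ne.symm h)
      have h1 := PySem.Int.mod_nonneg a hbpos
      have h2 := PySem.Int.mod_lt a hbpos
      rw [ih b (PySem.Int.mod a b) (by omega) hb h1]
      congr 1
      rw [PySem.Int.mod_eq_emod_of_pos hbpos, Int.emod_def]
      rw [mul_comm b (a / b)]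
      exact (Int.gcd_sub_mul_right_right b a (a / b)).trans (Int.gcd_comm b a)

theorem pygcd_eq (a b : Int) (ha : 0 ≤ a) (hb : 0 ≤ b) : pygcd a b = (Int.gcd a b : Int) :=
  pygcd_eq_aux b.natAbs a b le_rfl ha hb

theorem lcm_pos_int (a i : Int) (ha : 0 < a) (hi : 0 < i) : (0 : Int) < (Int.lcm a i : Int) := by
  have h := Int.gcd_mul_lcm a i
  have : 0 < Int.lcm a i := by
    rcases Nat.eq_zero_or_pos (Int.lcm a i) with h0 | h0
    · rw [h0, Nat.mul_zero] at h
      exact absurd h.symm (Nat.mul_ne_zero (by omega) (by omega))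
    · exact h0
  exact_mod_cast this

theorem step_eq_lcm (a i : Int) (ha : 0 < a) (hi : 0 < i) :
    PySem.Int.floordiv (a * i) (pygcd a i) = (Int.lcm a i : Int) := by
  rw [pygcd_eq a i (le_of_lt ha) (le_of_lt hi)]
  have hg : (0 : Int) < (Int.gcd a i : Int) := by positivity
  have hmul : (Int.gcd a i : Int) * (Int.lcm a i : Int) = a * i := by
    rw [← Int.natCast_mul, Int.gcd_mul_lcm]
    push_cast
    rw [abs_of_pos ha, abs_of_pos hi]
  rw [PySem.Int.floordiv_eq_ediv_of_pos hg, ← hmul, Int.mul_ediv_cancel_left _ (by omega)]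

theorem bLoop_some (num : Int) (L : List Int) : ∀ (a : Int), (∀ i ∈ L, 0 < i) → 0 < a →
    ∀ r, bLoop num L a = some r → (0 < r ∧ ∀ m : Int, (r ∣ m ↔ a ∣ m ∧ ∀ i ∈ L, i ∣ m)) := by
  induction L with
  | nil =>
    intro a _ ha r hr
    simp only [bLoop, Option.some.injEq] at hr
    subst hr
    exact ⟨ha, fun m => by simp⟩
  | cons i L ih =>
    intro a hL ha r hr
    have hi : 0 < i := hL i (List.mem_cons_self)
    simp only [bLoop] at hr
    rw [step_eq_lcm a i ha hi] at hr
    split at hr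
    · exact absurd hr (by simp)
    · have hlcm := lcm_pos_int a i ha hi
      obtain ⟨hrpos, hiff⟩ := ih _ (fun j hj => hL j (List.mem_cons_of_mem i hj)) hlcm r hr
      refine ⟨hrpos, fun m => ?_⟩
      rw [hiff m]
      constructor
      · rintro ⟨hl, hrest⟩
        refine ⟨dvd_trans (int_dvd_lcm_left a i) hl, ?_⟩
        intro j hj
        rcases List.mem_cons.mp hj with hji | hji
        · rw [hji]; exact dvd_trans (int_dvd_lcm_right a i) hl
        · exact hrest j hji
      · rintro ⟨hadvd, hall⟩
        exact ⟨int_lcm_dvd a i m hadvd (hall i (List.mem_cons_self)),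
          fun j hj => hall j (List.mem_cons_of_mem i hj)⟩

theorem bLoop_none (num : Int) (L : List Int) : ∀ (a : Int), (∀ i ∈ L, 0 < i) → 0 < a →
    bLoop num L a = none → ¬ (a ∣ num ∧ ∀ i ∈ L, i ∣ num) := by
  induction L with
  | nil => intro a _ _ hr; simp [bLoop] at hr
  | cons i L ih =>
    intro a hL ha hr
    have hi : 0 < i := hL i (List.mem_cons_self)
    simp only [bLoop] at hr
    rw [step_eq_lcm a i ha hi] at hr
    have hlcm := lcm_pos_int a i ha hi
    split at hr
    · rename_i hguard
      obtain ⟨hnum, hlt⟩ := hguard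
      rintro ⟨hadvd, hall⟩
      have hdvd : (Int.lcm a i : Int) ∣ num :=
        int_lcm_dvd a i num hadvd (hall i (List.mem_cons_self))
      have habs : (Int.lcm a i : Int) ∣ |num| := (dvd_abs _ _).mpr hdvd
      have hle : (Int.lcm a i : Int) ≤ |num| := Int.le_of_dvd (abs_pos.mpr hnum) habs
      exact absurd hle (not_le.mpr hlt)
    · rintro ⟨hadvd, hall⟩
      exact ih _ (fun j hj => hL j (List.mem_cons_of_mem i hj)) hlcm hr
        ⟨int_lcm_dvd a i num hadvd (hall i (List.mem_cons_self)),
         fun j hj => hall j (List.mem_cons_of_mem i hj)⟩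

-- ===== VERDICT (by name: the statement is the Claim_ definition above) =====
theorem div1throughNum_spec : Claim_equal_div1throughNum := by
  intro num top _
  unfold Spec_div1throughNum div1throughNum div1throughNum_alt
  by_cases htop : 0 ≤ top
  · -- top ≥ 0: range(1, top+1) has exactly top elements, all positive
    set L := PySem.List.pyRange 1 (top + 1) 1 with hLdef
    have hlen : L.length = top.toNat := by
      rw [hLdef, PySem.List.length_pyRange_one]; congr 1; omega
    have hpos : ∀ i ∈ L, 0 < i := by
      intro i hi
      have := (PySem.List.mem_pyRange_one).mp (hLdef ▸ hi)
      omega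
    have hA : (L.foldl (fun s i => if PySem.Int.mod num i == 0 then s + 1 else s) (0 : Int) = top)
        ↔ (∀ i ∈ L, i ∣ num) := by
      rw [PySem.List.foldl_count_if _ L 0]
      have hle : L.countP (fun i => PySem.Int.mod num i == 0) ≤ L.length := L.countP_le_length
      constructor
      · intro h i hi
        have hceq : L.countP (fun i => PySem.Int.mod num i == 0) = L.length := by omega
        have := (List.countP_eq_length).mp hceq i hi
        simp only [beq_iff_eq] at this
        exact (PySem.Int.mod_eq_zero_iff_dvd num i).mp this
      · intro h
        have hceq : L.countP (fun i => PySem.Int.mod num i == 0) = L.length :=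
          (List.countP_eq_length).mpr (fun i hi => by
            simp only [beq_iff_eq]
            exact (PySem.Int.mod_eq_zero_iff_dvd num i).mpr (h i hi))
        omega
    cases hB : bLoop num L 1 with
    | none =>
      have hnot := bLoop_none num L 1 hpos one_pos hB
      have hnall : ¬ (∀ i ∈ L, i ∣ num) := fun h => hnot ⟨one_dvd num, h⟩
      rw [if_neg (fun h => hnall (hA.mp h))]
    | some r =>
      obtain ⟨hrpos, hiff⟩ := bLoop_some num L 1 hpos one_pos r hB
      have hiffr : (L.foldl (fun s i => if PySem.Int.mod num i == 0 then s + 1 else s) (0 : Int) = top)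
          ↔ PySem.Int.mod num r = 0 := by
        rw [hA, PySem.Int.mod_eq_zero_iff_dvd, hiff num]
        simp
      by_cases h : PySem.Int.mod num r = 0
      · rw [if_pos (hiffr.mpr h)]; simp [htop, h]
      · rw [if_neg (fun hh => h (hiffr.mp hh))]; simp [h]
  · -- top < 0: the range is empty; A's count 0 ≠ top, B's `top >= 0` guard is False
    rw [PySem.List.pyRange_one_eq_nil (by omega)]
    simp only [List.foldl_nil, bLoop]
    rw [if_neg (by omega)]
    simp [htop]
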